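-- pv_equiv track=rewrite | github.com/joel-foo/DSA | Dynamic Programming/count_sawtooth.py | count_sawtooth
-- ===== SOURCE A (Python) =====
-- def count_sawtooth(arr):
--   up = 0
--   down = 0
--   count = 0
--   for i in range(1, len(arr)):
--     if arr[i] > arr[i - 1]:
--       # up sawtooth ending in arr[i] = appending arr[i] to any contiguous down sawtooth ending in arr[i - 1] + the [arr[i - 1], arr[i]]
--       up = down + 1
--       # If we are in up sawtooth, then the number of down sawtooth should be reset (i.e. it is not possible to get a down sawtooth ending in arr[i])
--       down = 0
--       count += up
--     elif arr[i] < arr[i - 1]: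
--       down = up + 1
--       up = 0
--       count += down
--   return count
-- ===== SOURCE B (Python) =====
-- def count_sawtooth(arr):
--   signs = [(1 if b > a else -1) for a, b in zip(arr, arr[1:]) if a != b]
--   runs = []
--   k = 0
--   prev = 0
--   for s in signs:
--     if s == -prev:
--       k += 1
--     else:
--       if k:
--         runs.append(k)
--       k = 1
--     prev = s
--   if k:
--     runs.append(k)
--   return sum(k * (k + 1) // 2 for k in runs)
-- ===== Notes on version B (the rewrite author's own statement) =====
-- stated objective: alternative
-- what changed: B replaces A's per-step up/down counters with a sign-sequence pass: it extracts the +1/-1 directions of strict adjacent pairs (skipping equal pairs), groups them into maximal alternating runs, and sums the closed form k*(k+1)//2 per run instead of accumulating per element.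
import Mathlib
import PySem

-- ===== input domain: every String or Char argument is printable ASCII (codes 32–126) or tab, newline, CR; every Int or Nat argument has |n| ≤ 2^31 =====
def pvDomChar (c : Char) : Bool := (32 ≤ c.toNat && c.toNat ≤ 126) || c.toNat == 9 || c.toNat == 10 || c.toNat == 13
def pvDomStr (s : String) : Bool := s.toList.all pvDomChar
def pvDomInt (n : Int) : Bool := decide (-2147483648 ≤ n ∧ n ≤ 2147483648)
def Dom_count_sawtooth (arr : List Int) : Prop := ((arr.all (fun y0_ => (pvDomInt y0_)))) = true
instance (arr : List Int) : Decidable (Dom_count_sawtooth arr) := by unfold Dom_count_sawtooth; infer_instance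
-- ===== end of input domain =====

-- B counts the same sawtooth subarrays by extracting the ±1 directions of strict adjacent
-- pairs (skipping equal pairs), grouping them into maximal alternating runs, and summing
-- the closed form k*(k+1)//2 per run; same O(n) cost, different decomposition.

-- ===== PORT A =====
-- A's loop over i in range(1, len(arr)) compares arr[i] with arr[i-1]; ported as the
-- structural recursion carrying the previous element and the same (up, down, count) state.
def count_sawtooth_goA (prev : Int) (rest : List Int) (up down count : Int) : Int :=
  match rest with
  | [] => count
  | x :: xs =>
    if x > prev then count_sawtooth_goA x xs (down + 1) 0 (count + (down + 1))
    else if x < prev then count_sawtooth_goA x xs 0 (up + 1) (count + (up + 1))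
    else count_sawtooth_goA x xs up down count

def count_sawtooth (arr : List Int) : Int :=
  match arr with
  | [] => 0
  | x :: xs => count_sawtooth_goA x xs 0 0 0

-- ===== PORT B =====
-- signs = [(1 if b > a else -1) for a, b in zip(arr, arr[1:]) if a != b]
def count_sawtooth_signs (arr : List Int) : List Int :=
  (arr.zip (arr.drop 1)).filterMap
    (fun p => if p.1 ≠ p.2 then some (if p.2 > p.1 then 1 else -1) else none)

-- the body of B's 'for s in signs' loop, state (runs, k, prev)
def count_sawtooth_runStep (st : List Int × Int × Int) (s : Int) : List Int × Int × Int :=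
  if s = -st.2.2 then (st.1, st.2.1 + 1, s)
  else ((if st.2.1 ≠ 0 then st.1 ++ [st.2.1] else st.1), 1, s)

def count_sawtooth_alt (arr : List Int) : Int :=
  let st := (count_sawtooth_signs arr).foldl count_sawtooth_runStep ([], 0, 0)
  let runs := if st.2.1 ≠ 0 then st.1 ++ [st.2.1] else st.1
  (runs.map (fun k => PySem.Int.floordiv (k * (k + 1)) 2)).sum

-- ===== PRECONDITION & SPEC =====
def Spec_count_sawtooth (arr : List Int) (out : Int) : Prop := out = count_sawtooth_alt arr
instance (arr : List Int) (out : Int) : Decidable (Spec_count_sawtooth arr out) := by unfold Spec_count_sawtooth; infer_instance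

-- ===== CLAIM (what is proved, stated in full; the proofs are below) =====
def Claim_equal_count_sawtooth : Prop := ∀ (arr : List Int), Dom_count_sawtooth arr → Spec_count_sawtooth arr (count_sawtooth arr)

-- ===== LEMMAS AND PROOFS =====

def pvTri (k : Int) : Int := PySem.Int.floordiv (k * (k + 1)) 2

def pvTriSum (rs : List Int) : Int := (rs.map pvTri).sum

-- total value represented by a run-fold state: closed runs plus the open run
def pvTotal (st : List Int × Int × Int) : Int := pvTriSum st.1 + pvTri st.2.1

theorem pvTri_succ (k : Int) : pvTri (k + 1) = pvTri k + (k + 1) := by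
  obtain ⟨m, hm⟩ := Int.even_mul_succ_self k
  have hm' : k * (k + 1) = 2 * m := by omega
  have h1 : (k + 1) * (k + 1 + 1) = 2 * (m + k + 1) := by nlinarith
  simp only [pvTri, hm', h1]
  rw [PySem.Int.floordiv, PySem.Int.floordiv, Int.mul_fdiv_cancel_left _ (by norm_num),
    Int.mul_fdiv_cancel_left _ (by norm_num)]
  ring

theorem pvTri_zero : pvTri 0 = 0 := by decide

theorem pvTriSum_append (rs : List Int) (k : Int) :
    pvTriSum (rs ++ [k]) = pvTriSum rs + pvTri k := by
  simp [pvTriSum]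

theorem pvTriSum_close (rs : List Int) (k : Int) :
    pvTriSum (if k ≠ 0 then rs ++ [k] else rs) = pvTriSum rs + pvTri k := by
  by_cases h : k = 0 <;> simp [h, pvTriSum_append, pvTri_zero]

theorem signs_cons (x y : Int) (xs : List Int) :
    count_sawtooth_signs (x :: y :: xs)
      = (if x ≠ y then [if y > x then (1 : Int) else -1] else []) ++ count_sawtooth_signs (y :: xs) := by
  by_cases h : x = y <;> simp [count_sawtooth_signs, h]

theorem signs_single (x : Int) : count_sawtooth_signs [x] = [] := by
  simp [count_sawtooth_signs]

-- run-step lemmas for B's fold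
theorem runStep_cont (runs : List Int) (k s ps : Int) (h : s = -ps) :
    count_sawtooth_runStep (runs, k, ps) s = (runs, k + 1, s) := by
  simp [count_sawtooth_runStep, h]

theorem runStep_close (runs : List Int) (k s ps : Int) (h : ¬ s = -ps) :
    count_sawtooth_runStep (runs, k, ps) s = ((if k ≠ 0 then runs ++ [k] else runs), 1, s) := by
  simp [count_sawtooth_runStep, h]

-- the core correspondence: A's (up,down,count) state vs B's run fold, related through
-- the open run length k and the previous sign ps
theorem pv_core (rest : List Int) : ∀ (prev k c ps : Int) (runs : List Int),
    count_sawtooth_goA prev rest (if ps = 1 then k else 0) (if ps = -1 then k else 0) c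
      = c - pvTri k - pvTriSum runs
        + pvTotal ((count_sawtooth_signs (prev :: rest)).foldl count_sawtooth_runStep (runs, k, ps)) := by
  induction rest with
  | nil =>
    intro prev k c ps runs
    simp [count_sawtooth_goA, signs_single, pvTotal]
    ring
  | cons x xs ih =>
    intro prev k c ps runs
    rw [signs_cons]
    rcases lt_trichotomy prev x with hgt | heq | hlt
    · -- x > prev: sign is 1
      have hne : prev ≠ x := ne_of_lt hgt
      rw [show count_sawtooth_goA prev (x :: xs) (if ps = 1 then k else 0)
              (if ps = -1 then k else 0) c
            = count_sawtooth_goA x xs ((if ps = -1 then k else 0) + 1) 0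
              (c + ((if ps = -1 then k else 0) + 1)) from by
            simp [count_sawtooth_goA, hgt]]
      rw [if_pos hne, show (if x > prev then (1 : Int) else -1) = 1 from if_pos hgt,
        List.cons_append, List.nil_append, List.foldl_cons]
      by_cases hps : ps = -1
      · subst hps
        rw [runStep_cont runs k 1 (-1) (by norm_num)]
        have h := ih x (k + 1) (c + (k + 1)) 1 runs
        norm_num at h ⊢
        rw [h, pvTri_succ]; ring
      · rw [runStep_close runs k 1 ps (by omega)]
        have h := ih x 1 (c + 1) 1 (if k ≠ 0 then runs ++ [k] else runs)
        rw [if_neg hps]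
        norm_num at h ⊢
        rw [h, show pvTriSum (if k = 0 then runs else runs ++ [k]) = pvTriSum runs + pvTri k from by
              by_cases hk : k = 0 <;> simp [hk, pvTriSum_append, pvTri_zero],
            show pvTri 1 = 1 from by decide]
        ring
    · -- equal elements: both sides skip
      subst heq
      rw [show count_sawtooth_goA prev (prev :: xs) (if ps = 1 then k else 0)
              (if ps = -1 then k else 0) c
            = count_sawtooth_goA prev xs (if ps = 1 then k else 0)
              (if ps = -1 then k else 0) c from by
            simp [count_sawtooth_goA]]
      simp only [ne_eq, not_true_eq_false, if_false, List.nil_append]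
      exact ih prev k c ps runs
    · -- x < prev: sign is -1
      have hne : prev ≠ x := (ne_of_lt hlt).symm
      rw [show count_sawtooth_goA prev (x :: xs) (if ps = 1 then k else 0)
              (if ps = -1 then k else 0) c
            = count_sawtooth_goA x xs 0 ((if ps = 1 then k else 0) + 1)
              (c + ((if ps = 1 then k else 0) + 1)) from by
            simp [count_sawtooth_goA, hlt, lt_asymm hlt]]
      rw [if_pos hne, show (if x > prev then (1 : Int) else -1) = -1 from if_neg (lt_asymm hlt),
        List.cons_append, List.nil_append, List.foldl_cons]
      by_cases hps : ps = 1
      · subst hps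
        rw [runStep_cont runs k (-1) 1 (by norm_num)]
        have h := ih x (k + 1) (c + (k + 1)) (-1) runs
        norm_num at h ⊢
        rw [h, pvTri_succ]; ring
      · rw [runStep_close runs k (-1) ps (by omega)]
        have h := ih x 1 (c + 1) (-1) (if k ≠ 0 then runs ++ [k] else runs)
        rw [if_neg hps]
        norm_num at h ⊢
        rw [h, show pvTriSum (if k = 0 then runs else runs ++ [k]) = pvTriSum runs + pvTri k from by
              by_cases hk : k = 0 <;> simp [hk, pvTriSum_append, pvTri_zero],
            show pvTri 1 = 1 from by decide]
        ring

-- ===== VERDICT (by name: the statement is the Claim_ definition above) =====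
theorem count_sawtooth_spec : Claim_equal_count_sawtooth := by
  intro arr _
  unfold Spec_count_sawtooth
  cases arr with
  | nil => decide
  | cons x xs =>
    have h := pv_core xs x 0 0 0 []
    norm_num at h
    show count_sawtooth_goA x xs 0 0 0 = _
    rw [show pvTriSum [] = 0 from by decide, show pvTri 0 = 0 from pvTri_zero] at h
    rw [h]
    unfold count_sawtooth_alt
    rcases hst : (count_sawtooth_signs (x :: xs)).foldl count_sawtooth_runStep ([], 0, 0) with ⟨runs, k, p⟩
    rw [show (fun k => PySem.Int.floordiv (k * (k + 1)) 2) = pvTri from rfl]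
    rw [show ((if k ≠ 0 then runs ++ [k] else runs).map pvTri).sum
          = pvTriSum (if k ≠ 0 then runs ++ [k] else runs) from rfl, pvTriSum_close]
    simp [pvTotal]
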